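-- pv_equiv track=rewrite | github.com/adam-on-the-internet/dsm-webscrape | util/plaintext_util.py | remove_blank_lines_from_start
-- ===== SOURCE A (Python) =====
-- def remove_blank_lines_from_start(dirty_lines):
--     clean_lines = []
--     start_recording = False
--     for line in dirty_lines:
--         if line.strip() != "":
--             start_recording = True
--         if start_recording:
--             clean_lines.append(line)
--     return clean_lines
-- ===== SOURCE B (Python) =====
-- def remove_blank_lines_from_start(dirty_lines):
--     # Backward index scan: record the smallest index holding a non-blank line
--     # (default len), then return the tail slice from that boundary.
--     start = len(dirty_lines)
--     for i in reversed(range(len(dirty_lines))):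
--         if dirty_lines[i].strip() != "":
--             start = i
--     return dirty_lines[start:]
-- ===== Notes on version B (the rewrite author's own statement) =====
-- stated objective: alternative
-- what changed: Instead of A's forward pass with a start_recording flag that appends each kept line, B scans the indices backwards recording the smallest index of a non-blank line (defaulting to len) and returns the single tail slice from that boundary.
import Mathlib
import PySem

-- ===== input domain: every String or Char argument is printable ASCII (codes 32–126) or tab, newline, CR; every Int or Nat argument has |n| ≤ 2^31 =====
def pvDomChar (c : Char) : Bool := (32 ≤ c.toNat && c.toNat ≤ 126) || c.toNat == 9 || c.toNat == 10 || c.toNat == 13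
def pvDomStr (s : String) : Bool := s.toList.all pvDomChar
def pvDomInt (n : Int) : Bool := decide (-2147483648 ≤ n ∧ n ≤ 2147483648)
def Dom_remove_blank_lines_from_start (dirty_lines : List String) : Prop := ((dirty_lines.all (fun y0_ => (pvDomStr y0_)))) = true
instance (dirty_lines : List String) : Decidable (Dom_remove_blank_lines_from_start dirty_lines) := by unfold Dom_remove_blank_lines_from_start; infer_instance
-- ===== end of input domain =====

-- B replaces A's forward flag-and-append loop by a backward index scan for the first non-blank boundary plus one tail slice (alternative; same cost).


-- ===== PORT A =====
-- Port of A: fold over the lines with state (clean_lines, start_recording).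
def pvStepA (st : List String × Bool) (line : String) : List String × Bool :=
  let start_recording := if PySem.Str.strip line ≠ "" then true else st.2
  (if start_recording then st.1 ++ [line] else st.1, start_recording)

def remove_blank_lines_from_start (dirty_lines : List String) : List String :=
  (dirty_lines.foldl pvStepA ([], false)).1

-- ===== PORT B =====
-- Port of B: backward scan over reversed(range(len)) recording the smallest
-- non-blank index (indexing is always in range, so pyGetD's default is never used),
-- then the tail slice dirty_lines[start:].
def remove_blank_lines_from_start_alt (dirty_lines : List String) : List String :=
  let start : Int :=
    ((List.range dirty_lines.length).reverse).foldl
      (fun st (i : Nat) => if PySem.Str.strip (PySem.List.pyGetD dirty_lines (i : Int) "") ≠ "" then (i : Int) else st)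
      (dirty_lines.length : Int)
  PySem.List.slice dirty_lines (some start) none

-- ===== PRECONDITION & SPEC =====
def Spec_remove_blank_lines_from_start (dirty_lines : List String) (out : List String) : Prop := out = remove_blank_lines_from_start_alt dirty_lines
instance (dirty_lines : List String) (out : List String) : Decidable (Spec_remove_blank_lines_from_start dirty_lines out) := by unfold Spec_remove_blank_lines_from_start; infer_instance

-- ===== CLAIM =====
def Claim_equal_remove_blank_lines_from_start : Prop := ∀ (dirty_lines : List String), Dom_remove_blank_lines_from_start dirty_lines → Spec_remove_blank_lines_from_start dirty_lines (remove_blank_lines_from_start dirty_lines)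

-- ===== LEMMAS AND PROOFS =====

-- Index of the first non-blank line (length if none): the boundary both programs compute.
def pvBoundary : List String → Nat
  | [] => 0
  | x :: xs => if PySem.Str.strip x ≠ "" then 0 else pvBoundary xs + 1

theorem pvStepA_true (acc : List String) (l : String) :
    pvStepA (acc, true) l = (acc ++ [l], true) := by
  unfold pvStepA; by_cases h : PySem.Str.strip l = "" <;> simp [h]

-- Once recording has started (flag true), A's fold appends every remaining line.
theorem foldA_true (ls : List String) (acc : List String) :
    ls.foldl pvStepA (acc, true) = (acc ++ ls, true) := by
  induction ls generalizing acc with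
  | nil => simp
  | cons l ls ih =>
      rw [List.foldl_cons, pvStepA_true]
      simpa using ih (acc ++ [l])

-- A's result is the drop at the boundary.
theorem A_eq_drop (ls : List String) :
    remove_blank_lines_from_start ls = ls.drop (pvBoundary ls) := by
  unfold remove_blank_lines_from_start
  induction ls with
  | nil => simp
  | cons l ls ih =>
      rw [List.foldl_cons]
      by_cases h : PySem.Str.strip l = ""
      · have hs : pvStepA ([], false) l = ([], false) := by simp [pvStepA, h]
        rw [hs]; simpa [pvBoundary, h] using ih
      · have hs : pvStepA ([], false) l = ([l], true) := by simp [pvStepA, h]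
        rw [hs, foldA_true]; simp [pvBoundary, h]

-- Shifting the index-selecting foldr through Nat.succ.
theorem foldr_succ_shift (L : List Nat) (q : Nat → Prop) [DecidablePred q] (b : Int) :
    (L.map Nat.succ).foldr (fun i st => if q i then (i : Int) else st) (b + 1)
      = L.foldr (fun i st => if q (i + 1) then (i : Int) else st) b + 1 := by
  induction L with
  | nil => rfl
  | cons i L ih =>
      by_cases h : q (i + 1) <;> simp [Nat.succ_eq_add_one, h, ih]

-- The backward fold over indices computes the boundary (getD form).
theorem boundary_foldr (ls : List String) :
    (List.range ls.length).foldr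
      (fun (i : Nat) st => if PySem.Str.strip (ls.getD i "") ≠ "" then (i : Int) else st)
      (ls.length : Int) = (pvBoundary ls : Int) := by
  induction ls with
  | nil => rfl
  | cons l ls ih =>
      rw [show (l :: ls).length = ls.length + 1 from rfl, List.range_succ_eq_map,
          List.foldr_cons,
          show ((ls.length + 1 : Nat) : Int) = (ls.length : Int) + 1 by push_cast; ring,
          foldr_succ_shift]
      by_cases h : PySem.Str.strip l = ""
      · simp only [List.getD_cons_zero, List.getD_cons_succ, ih]
        simp [pvBoundary, h]
      · simp [pvBoundary, h]

-- B's backward fold computes the boundary.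
theorem alt_fold_eq_boundary (ls : List String) :
    ((List.range ls.length).reverse).foldl
      (fun st (i : Nat) => if PySem.Str.strip (PySem.List.pyGetD ls (i : Int) "") ≠ "" then (i : Int) else st)
      (ls.length : Int) = (pvBoundary ls : Int) := by
  rw [List.foldl_reverse]
  simpa [PySem.List.pyGetD_natCast] using boundary_foldr ls

theorem alt_eq_drop (ls : List String) :
    remove_blank_lines_from_start_alt ls = ls.drop (pvBoundary ls) := by
  unfold remove_blank_lines_from_start_alt
  rw [alt_fold_eq_boundary, PySem.List.slice_from_natCast]

-- ===== VERDICT =====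
theorem remove_blank_lines_from_start_spec : Claim_equal_remove_blank_lines_from_start := by
  intro ls _
  unfold Spec_remove_blank_lines_from_start
  rw [A_eq_drop, alt_eq_drop]
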